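-- pv_equiv track=rewrite | github.com/ArielQuinn/BisimulationAlgorithms | PaigeAndTarjan.py | recreateC
-- ===== SOURCE A (Python) =====
-- def recreateC(pi, X):
--     C = []
--     for x in X:
--         i=0
--         for p in pi:
--             if p.issubset(x):
--                 i+=1
--             if i==2:
--                 C.append(x)
--                 break
--     return C
-- ===== SOURCE B (Python) =====
-- def recreateC(pi, X):
--     # Inverted index: element -> list of ids of pi-blocks containing it.
--     dblocks = [set(p) for p in pi]
--     need = [len(d) for d in dblocks]
--     empties = need.count(0)
--     index = {}
--     for i, d in enumerate(dblocks):
--         for e in d: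
--             index.setdefault(e, []).append(i)
--     C = []
--     for x in X:
--         hits = {}
--         for e in set(x):
--             for i in index.get(e, []):
--                 hits[i] = hits.get(i, 0) + 1
--         covered = empties + sum(1 for i, c in hits.items() if c == need[i])
--         if covered >= 2:
--             C.append(x)
--     return C
-- ===== Notes on version B (the rewrite author's own statement) =====
-- stated objective: alternative
-- what changed: Instead of testing every pi-block for subset-inclusion against every x (A's nested scan with an early break), B precomputes once an inverted index element->ids-of-blocks-containing-it plus per-block sizes, and for each x tallies per-block hit counts from x's own elements, declaring a block contained in x exactly when its hit count equals its size.
import Mathlib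
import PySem

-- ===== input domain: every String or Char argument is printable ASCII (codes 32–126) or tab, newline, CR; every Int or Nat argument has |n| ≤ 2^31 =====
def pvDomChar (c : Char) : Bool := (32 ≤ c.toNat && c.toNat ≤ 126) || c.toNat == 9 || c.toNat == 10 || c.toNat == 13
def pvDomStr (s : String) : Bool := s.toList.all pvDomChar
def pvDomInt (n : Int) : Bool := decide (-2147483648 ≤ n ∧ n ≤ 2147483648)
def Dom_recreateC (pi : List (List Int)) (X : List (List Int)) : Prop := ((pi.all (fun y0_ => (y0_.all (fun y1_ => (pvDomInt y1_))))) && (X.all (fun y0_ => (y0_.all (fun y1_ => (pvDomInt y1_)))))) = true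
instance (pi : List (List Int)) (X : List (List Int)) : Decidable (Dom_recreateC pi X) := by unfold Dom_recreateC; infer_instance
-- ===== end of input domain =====

-- B replaces A's per-x subset scan over all of pi by a precomputed element→block-ids
-- inverted index and a per-x coverage tally (objective: alternative algorithm, same result).

-- ===== PORT A =====
-- p.issubset(x): every element of the set p lies in the set x
def pyIssubset (p x : List Int) : Bool := p.all (fun e => x.contains e)

-- inner 'for p in pi' loop of A, with the counter i and the break at i == 2;
-- returns whether x gets appended to C
def recreateCLoop (x : List Int) : List (List Int) → Int → Bool
  | [], _ => false
  | p :: ps, i =>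
    let i' := if pyIssubset p x then i + 1 else i
    if i' == 2 then true else recreateCLoop x ps i'

def recreateC (pi : List (List Int)) (X : List (List Int)) : List (List Int) :=
  X.foldl (fun C x => if recreateCLoop x pi 0 then C ++ [x] else C) []

-- ===== PORT B =====
-- 'for i, d in enumerate(dblocks): for e in d: index.setdefault(e, []).append(i)'
def altIndex (dblocks : List (List Int)) : PySem.Dict Int (List Int) :=
  (PySem.List.enumerate dblocks).foldl
    (fun d q => q.2.foldl (fun d e => d.modify e [] (· ++ [q.1])) d)
    PySem.Dict.empty

def recreateC_alt (pi : List (List Int)) (X : List (List Int)) : List (List Int) :=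
  let dblocks := pi.map (fun p => PySem.List.dedup p)       -- [set(p) for p in pi]
  let need := dblocks.map (fun d => PySem.List.len d)       -- [len(d) for d in dblocks]
  let empties := PySem.List.count need 0                    -- need.count(0)
  let index := altIndex dblocks
  X.foldl (fun C x =>
    -- hits = {}; for e in set(x): for i in index.get(e, []): hits[i] = hits.get(i, 0) + 1
    let hits := (PySem.List.dedup x).foldl
      (fun h e => (index.getD e []).foldl (fun h i => h.insert i (h.getD i 0 + 1)) h)
      PySem.Dict.empty
    -- covered = empties + sum(1 for i, c in hits.items() if c == need[i])
    -- (need[i] is always in range: every key i of hits comes from enumerate(dblocks))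
    let covered : Int := (empties : Int) +
      hits.items.foldl (fun s pr => if pr.2 == PySem.List.pyGetD need pr.1 0 then s + 1 else s) 0
    if 2 ≤ covered then C ++ [x] else C) []

-- ===== PRECONDITION & SPEC =====
def Spec_recreateC (pi : List (List Int)) (X : List (List Int)) (out : List (List Int)) : Prop := out = recreateC_alt pi X
instance (pi : List (List Int)) (X : List (List Int)) (out : List (List Int)) : Decidable (Spec_recreateC pi X out) := by unfold Spec_recreateC; infer_instance

-- ===== CLAIM (what is proved, stated in full; the proofs are below) =====
def Claim_equal_recreateC : Prop := ∀ (pi : List (List Int)) (X : List (List Int)), Dom_recreateC pi X → Spec_recreateC pi X (recreateC pi X)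

-- ===== LEMMAS AND PROOFS =====

-- A's inner loop succeeds iff at least two blocks of pi are subsets of x
lemma recreateCLoop_eq (x : List Int) (ps : List (List Int)) (i : Int)
    (h : i = 0 ∨ i = 1) :
    recreateCLoop x ps i = decide (2 ≤ i + (ps.countP (fun p => pyIssubset p x) : Int)) := by
  induction ps generalizing i with
  | nil => simp [recreateCLoop]; omega
  | cons p ps ih =>
    rw [recreateCLoop]
    simp only [List.countP_cons]
    by_cases hs : pyIssubset p x
    · simp only [hs, if_true]
      rcases h with h | h <;> subst h
      · rw [show (0:Int) + 1 = 1 from by norm_num, if_neg (by decide), ih 1 (Or.inr rfl)]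
        simp only [decide_eq_decide]
        push_cast; omega
      · rw [show (1:Int) + 1 = 2 from by norm_num, if_pos (by decide)]
        have : (2:Int) ≤ 1 + ((ps.countP (fun p => pyIssubset p x) : Int) + if pyIssubset p x then 1 else 0) := by
          simp [hs]; omega
        simp only [hs, if_true] at this
        simp [this]
    · simp only [hs, Bool.false_eq_true, if_false]
      rw [if_neg (by rcases h with h|h <;> simp [h]), ih i h]
      simp

lemma filter_beq_of_nodup (b : List Int) (hb : b.Nodup) (e : Int) :
    b.filter (· == e) = if e ∈ b then [e] else [] := by
  induction b with
  | nil => simp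
  | cons a b ih =>
    rw [List.nodup_cons] at hb
    by_cases hae : a = e
    · subst hae
      have : b.filter (· == a) = [] := List.filter_eq_nil_iff.2 (by
        intro c hc hca; exact hb.1 (by simpa using (by simpa using hca) ▸ hc))
      simp [this]
    · simp [hae, ih hb.2, Ne.symm hae]

lemma altIndexFrom_getD (bs : List (List Int)) (s : Int) (d : PySem.Dict Int (List Int))
    (hnd : ∀ b ∈ bs, b.Nodup) (e : Int) :
    ((PySem.List.enumerate bs s).foldl
      (fun d q => q.2.foldl (fun d e' => d.modify e' [] (· ++ [q.1])) d) d).getD e []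
    = d.getD e [] ++ ((PySem.List.enumerate bs s).filter (fun q => decide (e ∈ q.2))).map (·.1) := by
  induction bs generalizing s d with
  | nil => simp [PySem.List.enumerate_nil]
  | cons b bs ih =>
    rw [PySem.List.enumerate_cons, List.foldl_cons, List.filter_cons,
      ih (s+1) _ (fun b hb => hnd b (List.mem_cons_of_mem _ hb))]
    have hinner : (b.foldl (fun d e' => d.modify e' [] (· ++ [s])) d).getD e []
        = d.getD e [] ++ (if e ∈ b then [s] else []) := by
      have h1 : b.foldl (fun d e' => d.modify e' [] (· ++ [s])) d
          = (b.map (fun a => (a, s))).foldl (fun d pr => d.modify pr.1 [] (· ++ [pr.2])) d := by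
        rw [List.foldl_map]
      rw [h1, PySem.Dict.getD_foldl_modify_append]
      congr 1
      rw [List.filter_map]
      have : ((b.filter (fun a => a == e)).map (fun a => (a, s))).map (·.2)
          = (if e ∈ b then [s] else []) := by
        rw [filter_beq_of_nodup b (hnd b (List.mem_cons_self)) e]
        split <;> simp
      simpa [Function.comp] using this
    simp only [hinner]
    by_cases hmem : e ∈ b <;> simp [hmem, List.append_assoc]


-- countP over a list of pairs with nodup keys: picks out the unique entry with key k
lemma countP_fst_unique {α : Type} (l : List (Int × α)) (hnd : (l.map (·.1)).Nodup)
    (k : Int) (b : α) (hmem : (k, b) ∈ l) (p : Int × α → Bool) :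
    l.countP (fun q => q.1 == k && p q) = if p (k, b) then 1 else 0 := by
  induction l with
  | nil => simp at hmem
  | cons q l ih =>
    rw [List.map_cons, List.nodup_cons] at hnd
    rcases List.mem_cons.1 hmem with h | h
    · subst h
      have hz : l.countP (fun q => q.1 == k && p q) = 0 := by
        apply List.countP_eq_zero.2
        intro q' hq'
        have : q'.1 ≠ k := by
          intro he; exact hnd.1 (he ▸ List.mem_map_of_mem (f := (·.1)) hq')
        simp [this]
      rw [List.countP_cons, hz]
      by_cases hp : p (k, b) <;> simp [hp]
    · have hk : q.1 ≠ k := by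
        intro he
        exact hnd.1 (he ▸ (List.mem_map_of_mem (f := (·.1)) h))
      rw [List.countP_cons, ih hnd.2 h]
      simp [hk]

lemma count_flatMap_indicator (E : Int → List Int) (u : List Int) (k : Int) (b : List Int)
    (h : ∀ e ∈ u, (E e).count k = if e ∈ b then 1 else 0) :
    (u.flatMap E).count k = u.countP (fun e => decide (e ∈ b)) := by
  induction u with
  | nil => simp
  | cons e u ih =>
    rw [List.flatMap_cons, List.count_append, List.countP_cons,
      h e List.mem_cons_self, ih (fun e' he' => h e' (List.mem_cons_of_mem _ he'))]
    by_cases hm : e ∈ b <;> simp [hm, Nat.add_comm]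

lemma countP_mem_eq_length_iff (u b : List Int) (hu : u.Nodup) (hb : b.Nodup) :
    (u.countP (fun e => decide (e ∈ b)) = b.length) ↔ (∀ e ∈ b, e ∈ u) := by
  rw [List.countP_eq_length_filter]
  set w := u.filter (fun e => decide (e ∈ b)) with hw
  have hwn : w.Nodup := hu.filter _
  have hwb : w ⊆ b := by intro e he; simpa using (List.mem_filter.1 he).2
  have hsp := hwn.subperm hwb
  constructor
  · intro hlen e he
    have hperm := hsp.perm_of_length_le (by omega)
    exact List.mem_of_mem_filter (hperm.symm.subset he)
  · intro hss
    have hbw : b ⊆ w := by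
      intro e he
      exact List.mem_filter.2 ⟨hss e he, by simpa using he⟩
    have h1 := hsp.length_le
    have h2 := (hb.subperm hbw).length_le
    omega

lemma countP_empty_split (bs : List (List Int)) (A : List Int → Bool) (hA : A [] = true) :
    bs.countP (fun b => b.isEmpty) + bs.countP (fun b => !b.isEmpty && A b) = bs.countP A := by
  induction bs with
  | nil => simp
  | cons b bs ih =>
    by_cases hb : b = []
    · subst hb; simp [hA]; omega
    · have : b.isEmpty = false := by simpa using hb
      simp only [List.countP_cons, this]
      by_cases hA' : A b <;> simp [hA'] <;> omega

lemma core_count (bs : List (List Int)) (u : List Int)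
    (hnd : ∀ b ∈ bs, b.Nodup) (hu : u.Nodup) :
    bs.countP (fun b => b.isEmpty) +
      (PySem.List.dedup ((u.flatMap (fun e => ((PySem.List.enumerate bs).filter (fun q => decide (e ∈ q.2))).map (·.1))))).countP
        (fun k => (((u.flatMap (fun e => ((PySem.List.enumerate bs).filter (fun q => decide (e ∈ q.2))).map (·.1))).count k : Int)
            == PySem.List.pyGetD (bs.map (fun d => PySem.List.len d)) k 0))
    = bs.countP (fun b => b.all (fun e => u.contains e)) := by
  set E : Int → List Int :=
    fun e => ((PySem.List.enumerate bs).filter (fun q => decide (e ∈ q.2))).map (·.1) with hE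
  set L := u.flatMap E with hL
  have hfst : ((PySem.List.enumerate bs).map (·.1)).Nodup :=
    List.pairwise_map.2 ((PySem.List.pairwise_lt_enumerate bs 0).imp (fun h => ne_of_lt h))
  have hmem_bs : ∀ q ∈ PySem.List.enumerate bs, q.2 ∈ bs := by
    intro q hq
    obtain ⟨j, hj, rfl⟩ := (PySem.List.mem_enumerate_iff bs 0 q).1 hq
    exact List.getElem_mem hj
  have countE : ∀ (e k : Int) (b : List Int), (k, b) ∈ PySem.List.enumerate bs →
      (E e).count k = if e ∈ b then 1 else 0 := by
    intro e k b hq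
    rw [hE]
    rw [List.count_eq_countP, List.countP_map, List.countP_filter]
    have := countP_fst_unique (PySem.List.enumerate bs) hfst k b hq (fun q => decide (e ∈ q.2))
    rw [show (fun (q : Int × List Int) => ((fun x => x == k) ∘ (·.1)) q && decide (e ∈ q.2))
        = (fun (q : Int × List Int) => q.1 == k && decide (e ∈ q.2)) from rfl, this]
    by_cases h : e ∈ b <;> simp [h]
  have countL : ∀ (k : Int) (b : List Int), (k, b) ∈ PySem.List.enumerate bs →
      L.count k = u.countP (fun e => decide (e ∈ b)) :=
    fun k b hq => count_flatMap_indicator E u k b (fun e _ => countE e k b hq)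
  have memL : ∀ k : Int, k ∈ L ↔ ∃ q ∈ PySem.List.enumerate bs, q.1 = k ∧ ∃ e ∈ u, e ∈ q.2 := by
    intro k
    rw [hL, List.mem_flatMap]
    constructor
    · rintro ⟨e, he, hk⟩
      rw [hE] at hk
      obtain ⟨q, hqf, hq1⟩ := List.mem_map.1 hk
      have hf := List.mem_filter.1 hqf
      exact ⟨q, hf.1, hq1, e, he, by simpa using hf.2⟩
    · rintro ⟨q, hq, hq1, e, he, heq⟩
      exact ⟨e, he, List.mem_map.2 ⟨q, List.mem_filter.2 ⟨hq, by simpa using heq⟩, hq1⟩⟩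
  have needAt : ∀ (k : Int) (b : List Int), (k, b) ∈ PySem.List.enumerate bs →
      PySem.List.pyGetD (bs.map (fun d => PySem.List.len d)) k 0 = (b.length : Int) := by
    intro k b hq
    obtain ⟨j, hj, hpair⟩ := (PySem.List.mem_enumerate_iff bs 0 (k, b)).1 hq
    have hk : k = (j : Int) := by simpa using congrArg Prod.fst hpair
    have hb : b = bs[j] := by simpa using congrArg Prod.snd hpair
    subst hk hb
    rw [PySem.List.pyGetD_natCast, List.getD_eq_getElem?_getD]
    simp [hj, PySem.List.len_eq]
  have key : (PySem.List.dedup L).countP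
        (fun k => ((L.count k : Int) == PySem.List.pyGetD (bs.map (fun d => PySem.List.len d)) k 0))
      = (PySem.List.enumerate bs).countP (fun q => !q.2.isEmpty && q.2.all (fun e => u.contains e)) := by
    set P : Int → Bool :=
      fun k => ((L.count k : Int) == PySem.List.pyGetD (bs.map (fun d => PySem.List.len d)) k 0) with hP
    set Q : Int × List Int → Bool :=
      fun q => !q.2.isEmpty && q.2.all (fun e => u.contains e) with hQ
    have nd1 : ((PySem.List.dedup L).filter P).Nodup := (PySem.List.nodup_dedup L).filter _
    have nd2 : (((PySem.List.enumerate bs).filter Q).map (·.1)).Nodup :=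
      List.pairwise_map.2 ((List.Pairwise.sublist List.filter_sublist (PySem.List.pairwise_lt_enumerate bs 0)).imp
        (fun h => ne_of_lt h))
    have hperm : ((PySem.List.dedup L).filter P).Perm
        (((PySem.List.enumerate bs).filter Q).map (·.1)) := by
      rw [List.perm_ext_iff_of_nodup nd1 nd2]
      intro k
      constructor
      · intro hk
        obtain ⟨hkd, hPk⟩ := List.mem_filter.1 hk
        have hkL : k ∈ L := (PySem.List.mem_dedup L k).1 hkd
        obtain ⟨q, hq0, hq1, e, he, heq⟩ := (memL k).1 hkL
        obtain ⟨kq, b⟩ := q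
        have hq : (k, b) ∈ PySem.List.enumerate bs := by
          have hkk : kq = k := hq1
          rwa [hkk] at hq0
        have hbn : b.Nodup := hnd b (hmem_bs _ hq)
        have hcnt : L.count k = u.countP (fun e => decide (e ∈ b)) := countL k b hq
        have hpos : 0 < L.count k := List.count_pos_iff.2 hkL
        have hEq : L.count k = b.length := by
          have := (beq_iff_eq).1 hPk
          rw [needAt k b hq] at this
          exact_mod_cast this
        have hsub : ∀ e' ∈ b, e' ∈ u :=
          (countP_mem_eq_length_iff u b hu hbn).1 (by omega)
        have hne : b.isEmpty = false := by
          cases b with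
          | nil => simp at hEq; omega
          | cons a l => rfl
        refine List.mem_map.2 ⟨(k, b), List.mem_filter.2 ⟨hq, ?_⟩, rfl⟩
        simp only [hQ]
        simp only [hne, Bool.not_false, Bool.true_and, List.all_eq_true]
        intro e' he'
        simpa [List.contains_iff_mem] using hsub e' he'
      · intro hk
        obtain ⟨q, hqf, hq1⟩ := List.mem_map.1 hk
        obtain ⟨hq0, hQq⟩ := List.mem_filter.1 hqf
        obtain ⟨kq, b⟩ := q
        have hq : (k, b) ∈ PySem.List.enumerate bs := by
          have hkk : kq = k := hq1
          rwa [hkk] at hq0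
        simp only [hQ] at hQq
        simp only [Bool.and_eq_true, Bool.not_eq_true', List.all_eq_true] at hQq
        obtain ⟨hne, hall⟩ := hQq
        have hbn : b.Nodup := hnd b (hmem_bs _ hq)
        have hsub : ∀ e' ∈ b, e' ∈ u := by
          intro e' he'
          simpa [List.contains_iff_mem] using hall e' he'
        have hcount : u.countP (fun e => decide (e ∈ b)) = b.length :=
          (countP_mem_eq_length_iff u b hu hbn).2 hsub
        have hblen : 0 < b.length := by
          cases b with
          | nil => simp at hne
          | cons a l => simp
        have hex : ∃ e ∈ u, decide (e ∈ b) = true := by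
          rw [← List.countP_pos_iff]; omega
        obtain ⟨e, he, heb⟩ := hex
        have hkL : k ∈ L := (memL k).2 ⟨(k, b), hq, rfl, e, he, by simpa using heb⟩
        refine List.mem_filter.2 ⟨(PySem.List.mem_dedup L k).2 hkL, ?_⟩
        simp only [hP]
        rw [countL k b hq, needAt k b hq, hcount]
        simp
    calc (PySem.List.dedup L).countP P
        = ((PySem.List.dedup L).filter P).length := List.countP_eq_length_filter
      _ = (((PySem.List.enumerate bs).filter Q).map (·.1)).length := hperm.length_eq
      _ = ((PySem.List.enumerate bs).filter Q).length := List.length_map ..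
      _ = (PySem.List.enumerate bs).countP Q := List.countP_eq_length_filter.symm
  rw [key]
  have hsnd : (PySem.List.enumerate bs).countP (fun q => !q.2.isEmpty && q.2.all (fun e => u.contains e))
      = bs.countP (fun b => !b.isEmpty && b.all (fun e => u.contains e)) := by
    rw [show (fun (q : Int × List Int) => !q.2.isEmpty && q.2.all (fun e => u.contains e))
        = ((fun b => !b.isEmpty && b.all (fun e => u.contains e)) ∘ (·.2)) from rfl,
      ← List.countP_map, PySem.List.map_snd_enumerate]
  rw [hsnd]
  exact countP_empty_split bs _ rfl


lemma altIndex_getD (dblocks : List (List Int)) (hnd : ∀ b ∈ dblocks, b.Nodup) (e : Int) :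
    (altIndex dblocks).getD e [] =
      ((PySem.List.enumerate dblocks).filter (fun q => decide (e ∈ q.2))).map (·.1) := by
  unfold altIndex
  rw [altIndexFrom_getD dblocks 0 PySem.Dict.empty hnd e]
  rfl

-- the per-x tally of B equals the number of blocks of pi contained in x
lemma covered_eq (pi : List (List Int)) (x : List Int) :
    ((PySem.List.count ((pi.map (fun p => PySem.List.dedup p)).map (fun d => PySem.List.len d)) 0 : Nat) : Int) +
      (((PySem.List.dedup x).foldl
        (fun h e => (((altIndex (pi.map (fun p => PySem.List.dedup p))).getD e []).foldl
          (fun h i => h.insert i (h.getD i 0 + 1)) h))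
        PySem.Dict.empty).items.foldl
          (fun s pr => if pr.2 == PySem.List.pyGetD ((pi.map (fun p => PySem.List.dedup p)).map (fun d => PySem.List.len d)) pr.1 0 then s + 1 else s) 0)
    = (pi.countP (fun p => pyIssubset p x) : Int) := by
  have hnd : ∀ b ∈ pi.map (fun p => PySem.List.dedup p), b.Nodup := by
    intro b hb
    obtain ⟨p, _, rfl⟩ := List.mem_map.1 hb
    exact PySem.List.nodup_dedup p
  have hEidx : ∀ e : Int, (altIndex (pi.map (fun p => PySem.List.dedup p))).getD e [] =
      ((PySem.List.enumerate (pi.map (fun p => PySem.List.dedup p))).filter (fun q => decide (e ∈ q.2))).map (·.1) :=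
    altIndex_getD _ hnd
  simp only [hEidx]
  rw [← List.foldl_flatMap, PySem.Dict.foldl_insert_getD_add_one_eq_counter,
    PySem.Dict.items_counter, ← PySem.List.dedup_eq_ofList, List.foldl_map,
    PySem.List.foldl_count_if]
  have hemp : PySem.List.count ((pi.map (fun p => PySem.List.dedup p)).map (fun d => PySem.List.len d)) 0
      = (pi.map (fun p => PySem.List.dedup p)).countP (fun b => b.isEmpty) := by
    rw [PySem.List.count_eq, List.count_eq_countP, List.countP_map]
    apply List.countP_congr
    intro b _
    simp [PySem.List.len_eq, List.isEmpty_iff, List.length_eq_zero_iff]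
  have hrhs : pi.countP (fun p => pyIssubset p x)
      = (pi.map (fun p => PySem.List.dedup p)).countP (fun b => b.all (fun e => (PySem.List.dedup x).contains e)) := by
    rw [List.countP_map]
    apply List.countP_congr
    intro p _
    simp [pyIssubset, List.all_eq_true]
  have hcore := core_count (pi.map (fun p => PySem.List.dedup p)) (PySem.List.dedup x) hnd (PySem.List.nodup_dedup x)
  rw [hemp, hrhs]
  dsimp only
  omega

-- ===== VERDICT (by name: the statement is the Claim_ definition above) =====
theorem recreateC_spec : Claim_equal_recreateC := by
  intro pi X _
  unfold Spec_recreateC recreateC recreateC_alt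
  apply PySem.List.foldl_congr_mem
  intro C x _
  show _ = if 2 ≤ _ + _ then _ else _
  rw [recreateCLoop_eq x pi 0 (Or.inl rfl), covered_eq pi x]
  simp
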